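-- pv_equiv track=rewrite | github.com/Edsel-Tan/dashboard | Solutions/269.py | process
-- ===== SOURCE A (Python) =====
-- def process(state):
--     states = []
--     for i in range(10):
--         s = [list(j) for j in state]
--         for j in range(len(s[0])):
--             s[1][j] -= i
--
--         d = []
--         for j in range(len(s[0])-1, -1, -1):
--             if s[1][j] % s[0][j] != 0:
--                 d.append(j)
--
--         for j in d:
--             del s[0][j]
--             del s[1][j]
--
--         for j in range(len(s[0])):
--             s[1][j] = -s[1][j] // s[0][j]
--
--         states.append(tuple([tuple(j) for j in s]))
--     return states
-- ===== SOURCE B (Python) =====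
-- def process(state):
--     def variant(i):
--         keep = [j for j, a in enumerate(state[0]) if (state[1][j] - i) % a == 0]
--         def new_row(r, row):
--             if r == 0:
--                 return tuple(row[j] for j in keep)
--             if r == 1:
--                 return tuple(-(row[j] - i) // state[0][j] for j in keep)
--             return tuple(row)
--         return tuple(new_row(r, row) for r, row in enumerate(state))
--     return [variant(i) for i in range(10)]
-- ===== Notes on version B (the rewrite author's own statement) =====
-- stated objective: simpler
-- what changed: B builds each of the 10 variants in one forward pass: a comprehension collects the column indices j with (state[1][j]-i) % state[0][j] == 0, and every output row is produced directly from it (row 0 = kept coefficients, row 1 = -(state[1][j]-i)//state[0][j] over kept columns, other rows unchanged), replacing A's five imperative passes (copy, subtract in place, collect bad indices in reverse, delete one by one from both rows, recompute row 1 in place); …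
import Mathlib
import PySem

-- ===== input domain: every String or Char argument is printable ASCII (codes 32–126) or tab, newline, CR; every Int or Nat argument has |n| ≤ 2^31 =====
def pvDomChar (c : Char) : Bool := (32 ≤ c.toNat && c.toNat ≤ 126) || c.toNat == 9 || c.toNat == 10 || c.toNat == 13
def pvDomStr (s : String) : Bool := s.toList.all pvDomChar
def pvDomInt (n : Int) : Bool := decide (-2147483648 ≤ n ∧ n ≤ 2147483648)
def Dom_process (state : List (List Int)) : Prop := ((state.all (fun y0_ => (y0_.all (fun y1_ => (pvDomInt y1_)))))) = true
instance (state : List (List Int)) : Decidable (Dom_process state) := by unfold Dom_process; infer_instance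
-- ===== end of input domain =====

-- B builds each variant in one forward filtering pass over the column indices instead of
-- A's five imperative passes (simpler decomposition).

-- ===== PORT A =====
-- one iteration of A's outer loop (the body for a fixed i), transliterated pass by pass
def processStep (state : List (List Int)) (i : Int) : List (List Int) :=
  -- s = [list(j) for j in state]
  let s := state.map (fun j => j.map (fun x => x))
  -- for j in range(len(s[0])): s[1][j] -= i
  let s := (List.range (s.getD 0 []).length).foldl
      (fun s j => s.set 1 ((s.getD 1 []).set j ((s.getD 1 []).getD j 0 - i))) s
  -- d = []; for j in range(len(s[0])-1, -1, -1): if ... : d.append(j)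
  let d := (PySem.List.pyRange (((s.getD 0 []).length : Int) - 1) (-1) (-1)).foldl
      (fun d j => if PySem.Int.mod ((s.getD 1 []).getD j.toNat 0) ((s.getD 0 []).getD j.toNat 0) ≠ 0
                  then d ++ [j] else d) ([] : List Int)
  -- for j in d: del s[0][j]; del s[1][j]
  let s := d.foldl (fun s j =>
      let s := s.set 0 ((s.getD 0 []).eraseIdx j.toNat)
      s.set 1 ((s.getD 1 []).eraseIdx j.toNat)) s
  -- for j in range(len(s[0])): s[1][j] = -s[1][j] // s[0][j]
  let s := (List.range (s.getD 0 []).length).foldl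
      (fun s j => s.set 1 ((s.getD 1 []).set j
        (PySem.Int.floordiv (-((s.getD 1 []).getD j 0)) ((s.getD 0 []).getD j 0)))) s
  s

def process (state : List (List Int)) : List (List (List Int)) :=
  (PySem.List.pyRange 0 10 1).foldl (fun states i => states ++ [processStep state i]) []

-- ===== PORT B =====
def process_alt (state : List (List Int)) : List (List (List Int)) :=
  (PySem.List.pyRange 0 10 1).map (fun i =>
    -- keep = [j for j, a in enumerate(state[0]) if (state[1][j] - i) % a == 0]
    let keep := ((PySem.List.enumerate (state.getD 0 [])).filter
        (fun ja => decide (PySem.Int.mod ((state.getD 1 []).getD ja.1.toNat 0 - i) ja.2 = 0))).map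
        Prod.fst
    -- tuple(new_row(r, row) for r, row in enumerate(state))
    (PySem.List.enumerate state).map (fun rrow =>
      if rrow.1 = 0 then keep.map (fun j => rrow.2.getD j.toNat 0)
      else if rrow.1 = 1 then keep.map (fun j =>
        PySem.Int.floordiv (-(rrow.2.getD j.toNat 0 - i)) ((state.getD 0 []).getD j.toNat 0))
      else rrow.2))

-- ===== PRECONDITION & SPEC =====
-- Pre_ excludes the inputs on which A raises (empty state; a nonempty row 0 with fewer than
-- 2 rows or row 1 shorter than row 0: IndexError; a zero in row 0: ZeroDivisionError) and,
-- beyond those, the malformed ragged states whose row 1 is longer than row 0, on which A's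
-- emitting of the raw surplus tail of row 1 (its passes only touch the first len(row 0)
-- entries) is an artefact of its in-place implementation; rows 0 and 1 are a coefficient row
-- and a value row and belong aligned.
def Pre_process (state : List (List Int)) : Prop :=
  state ≠ [] ∧
    (((state.headD []).length = 0 ∧ (state.tail.headD []).length = 0) ∨
      (2 ≤ state.length ∧ (state.headD []).length = (state.tail.headD []).length ∧
        ∀ x ∈ state.headD [], x ≠ 0))
instance (state : List (List Int)) : Decidable (Pre_process state) := by
  unfold Pre_process; infer_instance
def pvWitness_process : List (List Int) := [[2, 3], [4, 5]]
def Spec_process (state : List (List Int)) (out : List (List (List Int))) : Prop := out = process_alt state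
instance (state : List (List Int)) (out : List (List (List Int))) : Decidable (Spec_process state out) := by unfold Spec_process; infer_instance

-- ===== CLAIM (what is proved, stated in full; the proofs are below) =====
def Claim_equal_process : Prop := ∀ (state : List (List Int)), Dom_process state → Pre_process state → Spec_process state (process state)

-- ===== LEMMAS AND PROOFS =====
-- the set of kept column indices for variant i (proof-side abbreviation)
def Kdef (r0 r1 : List Int) (i : Int) : List Nat :=
  (List.range r0.length).filter
    (fun j => decide (PySem.Int.mod (r1.getD j 0 - i) (r0.getD j 0) = 0))

theorem pv_set_at {α} [Inhabited α] (M tail : List α) (x y : α) (k : Nat) (hk : M.length = k) :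
    (M ++ x :: tail).set k y = M ++ y :: tail := by subst hk; simp
theorem pv_getD_at {α} [Inhabited α] (M tail : List α) (x d : α) (k : Nat) (hk : M.length = k) :
    (M ++ x :: tail).getD k d = x := by subst hk; simp [List.getD_eq_getElem?_getD]
theorem pv_sub_loop (n : Nat) (u v : List Int) (rest : List (List Int)) (i : Int)
    (h : n ≤ v.length) :
    (List.range n).foldl
      (fun s j => s.set 1 ((s.getD 1 []).set j ((s.getD 1 []).getD j 0 - i))) (u :: v :: rest)
    = u :: ((List.range n).map (fun j => v.getD j 0 - i) ++ v.drop n) :: rest := by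
  induction n with
  | zero => simp
  | succ n ih =>
    rw [List.range_succ, List.foldl_append, ih (by omega)]
    have hn : n < v.length := by omega
    rw [List.drop_eq_getElem_cons hn]
    have hlen : (List.map (fun j => v.getD j 0 - i) (List.range n)).length = n := by simp
    simp only [List.foldl_cons, List.foldl_nil, List.getD_cons_succ, List.getD_cons_zero,
      List.set_cons_succ, List.set_cons_zero, List.map_append, List.map_cons, List.map_nil]
    rw [pv_getD_at _ _ _ _ _ hlen, pv_set_at _ _ _ _ _ hlen]
    simp [List.getD_eq_getElem?_getD, List.getElem?_eq_getElem hn]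
theorem pv_drop_at {α} (M tail : List α) (k : Nat) (hk : M.length = k) :
    (M ++ tail).drop k = tail := by subst hk; simp
theorem pv_erase_desc (keep : Nat → Bool) (n : Nat) (l : List Int) (h : n ≤ l.length) :
    (((List.range n).filter (fun j => !keep j)).reverse).foldl (fun l j => l.eraseIdx j) l
    = (List.range n).filterMap (fun j => if keep j then some (l.getD j 0) else none)
      ++ l.drop n := by
  induction n generalizing l with
  | zero => simp
  | succ n ih =>
    rw [List.range_succ, List.filter_append, List.reverse_append, List.foldl_append]
    by_cases hk : keep n
    · simp only [List.filter_cons, List.filter_nil, hk, Bool.not_true, List.reverse_nil,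
        List.foldl_nil, if_neg, Bool.false_eq_true, not_false_iff]
      rw [ih l (by omega)]
      have hn : n < l.length := by omega
      rw [List.drop_eq_getElem_cons hn, List.filterMap_append]
      simp [hk, List.getD_eq_getElem?_getD, List.getElem?_eq_getElem hn]
    · simp only [List.filter_cons, List.filter_nil, hk, Bool.not_false]
      rw [if_pos trivial]
      simp only [List.reverse_cons, List.reverse_nil, List.nil_append, List.foldl_cons, List.foldl_nil]
      have hn : n < l.length := by omega
      have hlen : (l.eraseIdx n).length = l.length - 1 := by
        simp [List.length_eraseIdx, hn]
      rw [ih (l.eraseIdx n) (by omega)]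
      have h1 : (List.range n).filterMap (fun j => if keep j then some ((l.eraseIdx n).getD j 0) else none)
          = (List.range n).filterMap (fun j => if keep j then some (l.getD j 0) else none) := by
        apply List.filterMap_congr
        intro j hj
        have hjn : j < n := List.mem_range.mp hj
        have : (l.eraseIdx n).getD j 0 = l.getD j 0 := by
          rw [List.getD_eq_getElem?_getD, List.getD_eq_getElem?_getD,
            List.getElem?_eq_getElem (by omega : j < (l.eraseIdx n).length),
            List.getElem?_eq_getElem (by omega : j < l.length),
            List.getElem_eraseIdx_of_lt (by omega) hjn]
        rw [this]
      have h2 : (l.eraseIdx n).drop n = l.drop (n + 1) := by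
        rw [List.eraseIdx_eq_take_drop_succ]
        exact pv_drop_at _ _ _ (by simp [List.length_take]; omega)
      rw [h1, h2, List.filterMap_append]
      simp [hk]
theorem pv_div_loop (n : Nat) (u v : List Int) (rest : List (List Int))
    (h : n ≤ v.length) :
    (List.range n).foldl
      (fun s j => s.set 1 ((s.getD 1 []).set j
        (PySem.Int.floordiv (-((s.getD 1 []).getD j 0)) ((s.getD 0 []).getD j 0)))) (u :: v :: rest)
    = u :: ((List.range n).map (fun j =>
        PySem.Int.floordiv (-(v.getD j 0)) (u.getD j 0)) ++ v.drop n) :: rest := by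
  induction n with
  | zero => simp
  | succ n ih =>
    rw [List.range_succ, List.foldl_append, ih (by omega)]
    have hn : n < v.length := by omega
    rw [List.drop_eq_getElem_cons hn]
    have hlen : (List.map (fun j => PySem.Int.floordiv (-(v.getD j 0)) (u.getD j 0)) (List.range n)).length = n := by simp
    simp only [List.foldl_cons, List.foldl_nil, List.getD_cons_succ, List.getD_cons_zero,
      List.set_cons_succ, List.set_cons_zero, List.map_append, List.map_cons, List.map_nil]
    rw [pv_getD_at _ _ _ _ _ hlen, pv_set_at _ _ _ _ _ hlen]
    simp [List.getD_eq_getElem?_getD, List.getElem?_eq_getElem hn]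
theorem pv_filterMap_ite {α β} (p : α → Bool) (f : α → β) (l : List α) :
    l.filterMap (fun a => if p a then some (f a) else none) = (l.filter p).map f := by
  induction l with
  | nil => rfl
  | cons x xs ih =>
    by_cases h : p x <;> simp [h, ih]
theorem pv_del_split (ds : List Nat) (x0 x1 : List Int) (rest : List (List Int)) :
    ds.foldl (fun s j =>
      (s.set 0 ((s.getD 0 []).eraseIdx j)).set 1
        (((s.set 0 ((s.getD 0 []).eraseIdx j)).getD 1 []).eraseIdx j)) (x0 :: x1 :: rest)
    = (ds.foldl (fun l j => l.eraseIdx j) x0) :: (ds.foldl (fun l j => l.eraseIdx j) x1) :: rest := by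
  induction ds generalizing x0 x1 with
  | nil => rfl
  | cons d ds ih => simp only [List.foldl_cons]; exact ih _ _

theorem pv_final_rows (K : List Nat) (f g : Nat → Int) (tail : List Int) :
    (List.range (K.map f).length).map (fun j =>
      PySem.Int.floordiv (-(((K.map g) ++ tail).getD j 0)) ((K.map f).getD j 0))
    = K.map (fun k => PySem.Int.floordiv (-(g k)) (f k)) := by
  apply List.ext_getElem
  · simp
  · intro t h1 h2
    simp only [List.length_map, List.length_range] at h1 h2
    simp only [List.getElem_map, List.getElem_range]
    rw [List.getD_eq_getElem?_getD, List.getD_eq_getElem?_getD,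
      List.getElem?_append_left (by simpa using h2),
      List.getElem?_eq_getElem (by simpa using h2), List.getElem?_eq_getElem (by simpa using h2)]
    simp

theorem pv_step (r0 r1 : List Int) (rest : List (List Int)) (i : Int)
    (hn : r0.length ≤ r1.length) :
    processStep (r0 :: r1 :: rest) i =
      [((Kdef r0 r1 i).map (fun j => r0.getD j 0)),
       ((Kdef r0 r1 i).map
          (fun j => PySem.Int.floordiv (-(r1.getD j 0 - i)) (r0.getD j 0))) ++ r1.drop r0.length]
      ++ rest := by
  have hid : List.map (fun (j : List Int) => List.map (fun x => x) j) (r0::r1::rest) = r0::r1::rest := by simp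
  unfold processStep Kdef
  simp only [hid, List.getD_cons_zero]
  rw [pv_sub_loop r0.length r0 r1 rest i hn]
  simp only [List.getD_cons_zero, List.getD_cons_succ]
  have hr : PySem.List.pyRange ((r0.length : Int) - 1) (-1) (-1)
      = ((List.range r0.length).map (fun k : Nat => (k : Int))).reverse := by
    rw [PySem.List.pyRange_neg_one_eq_reverse]
    norm_num [PySem.List.pyRange_zero_nat]
  have hfun : (fun (d : List Int) (j : Int) =>
        if PySem.Int.mod ((List.map (fun j => r1.getD j 0 - i) (List.range r0.length) ++ List.drop r0.length r1).getD j.toNat 0) (r0.getD j.toNat 0) ≠ 0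
        then d ++ [j] else d)
      = (fun (d : List Int) (j : Int) =>
        if (fun j : Int => !(decide (PySem.Int.mod ((List.map (fun j => r1.getD j 0 - i) (List.range r0.length) ++ List.drop r0.length r1).getD j.toNat 0) (r0.getD j.toNat 0) = 0))) j = true
        then d ++ [(fun j : Int => j) j] else d) := by
    funext d j
    by_cases h : PySem.Int.mod ((List.map (fun j => r1.getD j 0 - i) (List.range r0.length) ++ List.drop r0.length r1).getD j.toNat 0) (r0.getD j.toNat 0) = 0 <;>
      simp
  rw [hr, hfun, PySem.List.foldl_append_if]
  simp only [List.nil_append, List.map_id', List.filter_reverse, List.filter_map,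
    Function.comp_def]
  have hget : ∀ x, x < r0.length →
      (List.map (fun j => r1.getD j 0 - i) (List.range r0.length) ++ List.drop r0.length r1).getD x 0
      = r1.getD x 0 - i := by
    intro x hx
    rw [List.getD_eq_getElem?_getD, List.getElem?_append_left (by simp [hx]),
      List.getElem?_eq_getElem (by simp [hx])]
    simp
  have hfil : List.filter (fun x : Nat => !decide (PySem.Int.mod
        ((List.map (fun j => r1.getD j 0 - i) (List.range r0.length) ++ List.drop r0.length r1).getD
          (↑x : Int).toNat 0)
        (r0.getD (↑x : Int).toNat 0) = 0)) (List.range r0.length)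
      = List.filter (fun x : Nat => !decide (PySem.Int.mod (r1.getD x 0 - i) (r0.getD x 0) = 0))
        (List.range r0.length) := by
    apply List.filter_congr
    intro x hx
    simp only [Int.toNat_natCast, hget x (List.mem_range.mp hx)]
  rw [hfil, ← List.map_reverse, List.foldl_map]
  simp only [Int.toNat_natCast]
  rw [pv_del_split]
  rw [pv_erase_desc _ r0.length r0 (le_refl _)]
  rw [pv_erase_desc _ r0.length
        (List.map (fun j => r1.getD j 0 - i) (List.range r0.length) ++ List.drop r0.length r1)
        (by simp)]
  rw [pv_filterMap_ite, pv_filterMap_ite]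
  simp only [List.drop_length, List.append_nil]
  rw [pv_drop_at (List.map (fun j => r1.getD j 0 - i) (List.range r0.length))
        (List.drop r0.length r1) r0.length (by simp)]
  have hmapg : List.map (fun j =>
        (List.map (fun j => r1.getD j 0 - i) (List.range r0.length) ++ List.drop r0.length r1).getD j 0)
        (List.filter (fun j => decide (PySem.Int.mod (r1.getD j 0 - i) (r0.getD j 0) = 0)) (List.range r0.length))
      = List.map (fun j => r1.getD j 0 - i)
        (List.filter (fun j => decide (PySem.Int.mod (r1.getD j 0 - i) (r0.getD j 0) = 0)) (List.range r0.length)) := by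
    apply List.map_congr_left
    intro x hx
    exact hget x (List.mem_range.mp (List.mem_of_mem_filter hx))
  rw [hmapg]
  simp only [List.getD_cons_zero]
  rw [pv_div_loop _ _ _ _ (by simp)]
  rw [pv_final_rows
        (List.filter (fun j => decide (PySem.Int.mod (r1.getD j 0 - i) (r0.getD j 0) = 0)) (List.range r0.length))
        (fun j => r0.getD j 0) (fun j => r1.getD j 0 - i) (List.drop r0.length r1)]
  rw [pv_drop_at
        (List.map (fun j => r1.getD j 0 - i)
          (List.filter (fun j => decide (PySem.Int.mod (r1.getD j 0 - i) (r0.getD j 0) = 0)) (List.range r0.length)))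
        (List.drop r0.length r1)
        ((List.map (fun j => r0.getD j 0)
          (List.filter (fun j => decide (PySem.Int.mod (r1.getD j 0 - i) (r0.getD j 0) = 0)) (List.range r0.length))).length)
        (by simp)]
  simp

theorem pv_a_closed (r0 r1 : List Int) (rest : List (List Int))
    (hn : r0.length ≤ r1.length) :
    process (r0 :: r1 :: rest)
    = (PySem.List.pyRange 0 10 1).map (fun i =>
        (Kdef r0 r1 i).map (fun j => r0.getD j 0) ::
        ((Kdef r0 r1 i).map
            (fun j => PySem.Int.floordiv (-(r1.getD j 0 - i)) (r0.getD j 0))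
          ++ r1.drop r0.length) :: rest) := by
  unfold process
  rw [PySem.List.foldl_append_singleton_eq_map]
  simp only [List.nil_append]
  apply List.map_congr_left
  intro i _
  rw [pv_step r0 r1 rest i hn]
  rfl

theorem pv_keep (r0 r1 : List Int) (i : Int) :
    ((PySem.List.enumerate r0).filter
        (fun ja => decide (PySem.Int.mod (r1.getD ja.1.toNat 0 - i) ja.2 = 0))).map Prod.fst
    = (Kdef r0 r1 i).map (fun j : Nat => (j : Int)) := by
  rw [PySem.List.enumerate_eq_map_pyRange (d := 0)]
  simp only [PySem.List.len_eq]
  rw [PySem.List.pyRange_zero_natCast, List.map_map, List.filter_map, List.map_map]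
  unfold Kdef
  rw [List.filter_congr (q := fun j : Nat =>
      decide (PySem.Int.mod (r1.getD j 0 - i) (r0.getD j 0) = 0)) ?_]
  · apply List.map_congr_left
    intro x _
    rfl
  · intro x hx
    simp [PySem.List.pyGetD_natCast]

theorem pv_enum_rest (f : Int × List Int → List Int)
    (hf : ∀ r row, 2 ≤ r → f (r, row) = row) :
    ∀ (rest : List (List Int)) (s : Int), 2 ≤ s →
      (PySem.List.enumerate rest s).map f = rest := by
  intro rest
  induction rest with
  | nil => intro s _; simp [PySem.List.enumerate_nil]
  | cons x xs ih =>
    intro s hs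
    rw [PySem.List.enumerate_cons, List.map_cons, hf s x hs, ih (s + 1) (by omega)]

theorem pv_alt_closed (r0 r1 : List Int) (rest : List (List Int)) :
    process_alt (r0 :: r1 :: rest)
    = (PySem.List.pyRange 0 10 1).map (fun i =>
        (Kdef r0 r1 i).map (fun j => r0.getD j 0) ::
        ((Kdef r0 r1 i).map
            (fun j => PySem.Int.floordiv (-(r1.getD j 0 - i)) (r0.getD j 0))) :: rest) := by
  unfold process_alt
  apply List.map_congr_left
  intro i _
  simp only [List.getD_cons_zero, List.getD_cons_succ]
  rw [pv_keep]
  rw [PySem.List.enumerate_cons, PySem.List.enumerate_cons, List.map_cons, List.map_cons]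
  norm_num
  exact pv_enum_rest _ (fun r row hr => by
    simp only [if_neg (by omega : ¬ r = 0), if_neg (by omega : ¬ r = 1)]) rest 2 (by omega)

-- ===== VERDICT (by name: the statement is the Claim_ definition above) =====
theorem process_spec : Claim_equal_process := by
  intro state _ hpre
  unfold Spec_process
  obtain ⟨hne, hdisj⟩ := hpre
  match state with
  | [] => exact absurd rfl hne
  | [r0] =>
    have h0 : r0 = [] := by
      rcases hdisj with h | h
      · exact List.eq_nil_of_length_eq_zero (by simpa using h.1)
      · simp at h
    subst h0
    decide
  | r0 :: r1 :: rest =>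
    have hlen : r0.length = r1.length := by
      rcases hdisj with h | h
      · obtain ⟨h1, h2⟩ := h
        simp only [List.headD_cons, List.tail_cons] at h1 h2
        omega
      · have := h.2.1
        simp only [List.headD_cons, List.tail_cons] at this
        exact this
    rw [pv_a_closed r0 r1 rest (le_of_eq hlen), pv_alt_closed]
    apply List.map_congr_left
    intro i _
    rw [show r1.drop r0.length = [] from by rw [hlen]; exact List.drop_length,
      List.append_nil]
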